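-- pv_equiv track=rewrite | github.com/p4r3553/Sigint | Hackrf/mac.py | find_access_address_sliding
-- ===== SOURCE A (Python) =====
-- ACCESS_ADDRESS_BIN = '01101011111101100010001110001110'  # 0x8E89BED6 en LSB first
--
-- def find_access_address_sliding(bits, access_address=ACCESS_ADDRESS_BIN, max_shift=8):
--     aa_len = len(access_address)
--     found_positions = []
--     for shift in range(max_shift):
--         for i in range(len(bits) - aa_len - shift):
--             segment = bits[i+shift:i+shift+aa_len]
--             segment_str = ''.join(str(b) for b in segment)
--             if segment_str == access_address:
--                 found_positions.append(i+shift)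
--     return found_positions
-- ===== SOURCE B (Python) =====
-- ACCESS_ADDRESS_BIN = '01101011111101100010001110001110'  # 0x8E89BED6 en LSB first
--
-- def find_access_address_sliding(bits, access_address=ACCESS_ADDRESS_BIN, max_shift=8):
--     aa_len = len(access_address)
--     # scan for pattern matches once (A rescans the bits for every shift)
--     matches = [p for p in range(len(bits) - aa_len)
--                if ''.join(str(b) for b in bits[p:p+aa_len]) == access_address]
--     out = []
--     lo = 0
--     for shift in range(max_shift):
--         # matches is increasing, so positions < shift form a prefix; advance past it
--         while lo < len(matches) and matches[lo] < shift:
--             lo += 1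
--         if lo == len(matches):
--             break  # every later shift would contribute nothing
--         out.extend(matches[lo:])
--     return out
-- ===== Notes on version B (the rewrite author's own statement) =====
-- stated objective: faster
-- what changed: B scans the bit list for pattern matches once, then per shift emits the suffix of the precomputed increasing match list via an advancing pointer (breaking once the pointer is exhausted), instead of A's full re-scan (slice + join + compare) of the bits for every shift.
import Mathlib
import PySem

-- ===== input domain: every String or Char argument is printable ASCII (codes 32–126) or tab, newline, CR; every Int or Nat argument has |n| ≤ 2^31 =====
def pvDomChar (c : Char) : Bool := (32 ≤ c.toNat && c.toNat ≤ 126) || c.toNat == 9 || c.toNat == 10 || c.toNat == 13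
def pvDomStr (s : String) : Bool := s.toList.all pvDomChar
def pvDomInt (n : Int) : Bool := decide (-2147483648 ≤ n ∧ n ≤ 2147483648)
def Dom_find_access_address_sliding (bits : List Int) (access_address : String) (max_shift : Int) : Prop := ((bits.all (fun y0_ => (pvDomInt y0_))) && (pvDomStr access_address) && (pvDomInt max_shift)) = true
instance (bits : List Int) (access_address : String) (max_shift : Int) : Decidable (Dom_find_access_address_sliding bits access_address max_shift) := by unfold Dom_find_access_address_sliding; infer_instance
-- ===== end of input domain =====

-- B scans for pattern matches once and then emits, per shift, the increasing suffix of the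
-- precomputed match list (two-pointer), instead of A's re-scan of the bits for every shift.

-- ===== PORT A =====
def find_access_address_sliding (bits : List Int) (access_address : String) (max_shift : Int) : List Int :=
  let aa_len : Int := PySem.Str.len access_address
  (PySem.List.pyRange 0 max_shift 1).foldl (fun found_positions shift =>
    (PySem.List.pyRange 0 (PySem.List.len bits - aa_len - shift) 1).foldl (fun found2 i =>
      let segment := PySem.List.slice bits (some (i + shift)) (some (i + shift + aa_len))
      let segment_str := PySem.Str.join "" (segment.map PySem.Int.toStr)
      if segment_str == access_address then found2 ++ [i + shift] else found2)
      found_positions) []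

-- ===== PORT B =====
-- the 'while lo < len(matches) and matches[lo] < shift' pointer advance: matches[lo:] as a suffix list
def pvSkipLt : List Int → Int → List Int
  | [], _ => []
  | p :: rest, s => if p < s then pvSkipLt rest s else p :: rest

-- the 'for shift in range(max_shift): … break' emit loop; m is the suffix matches[lo:]
def pvEmit : List Int → List Int → List Int → List Int
  | [], _, out => out
  | shift :: rest, m, out =>
      let rem := pvSkipLt m shift
      if rem = [] then out else pvEmit rest rem (out ++ rem)

def find_access_address_sliding_alt (bits : List Int) (access_address : String) (max_shift : Int) : List Int :=
  let aa_len : Int := PySem.Str.len access_address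
  let matched := (PySem.List.pyRange 0 (PySem.List.len bits - aa_len) 1).filter (fun p =>
    PySem.Str.join "" ((PySem.List.slice bits (some p) (some (p + aa_len))).map PySem.Int.toStr)
      == access_address)
  pvEmit (PySem.List.pyRange 0 max_shift 1) matched []

-- ===== PRECONDITION & SPEC =====
def Spec_find_access_address_sliding (bits : List Int) (access_address : String) (max_shift : Int) (out : List Int) : Prop := out = find_access_address_sliding_alt bits access_address max_shift
instance (bits : List Int) (access_address : String) (max_shift : Int) (out : List Int) : Decidable (Spec_find_access_address_sliding bits access_address max_shift out) := by unfold Spec_find_access_address_sliding; infer_instance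

-- ===== CLAIM (what is proved, stated in full; the proofs are below) =====
def Claim_equal_find_access_address_sliding : Prop := ∀ (bits : List Int) (access_address : String) (max_shift : Int), Dom_find_access_address_sliding bits access_address max_shift → Spec_find_access_address_sliding bits access_address max_shift (find_access_address_sliding bits access_address max_shift)

-- ===== LEMMAS AND PROOFS =====

-- advancing the pointer past elements < s on a sorted list is filtering by s ≤ ·
theorem pv_skipLt_eq_filter (l : List Int) (s : Int) (h : l.Pairwise (· ≤ ·)) :
    pvSkipLt l s = l.filter (fun p => decide (s ≤ p)) := by
  induction l with
  | nil => rfl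
  | cons p rest ih =>
    rcases List.pairwise_cons.mp h with ⟨hp, hrest⟩
    by_cases hps : p < s
    · simp [pvSkipLt, hps, ih hrest, show ¬ s ≤ p by omega]
    · simp only [pvSkipLt, if_neg hps, List.filter_cons]
      rw [if_pos (by simp; omega), List.filter_eq_self.mpr]
      intro q hq
      have := hp q hq
      simp; omega

theorem pv_filter_le_pyRange (s N : Int) (hs : 0 ≤ s) :
    (PySem.List.pyRange 0 N 1).filter (fun p => decide (s ≤ p)) = PySem.List.pyRange s N 1 := by
  rcases le_or_gt s N with h | h
  · rw [PySem.List.pyRange_one_append 0 s N hs h, List.filter_append]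
    rw [List.filter_eq_nil_iff.mpr, List.filter_eq_self.mpr, List.nil_append]
    · intro x hx
      have := (PySem.List.mem_pyRange_one.mp hx).1
      simp; omega
    · intro x hx
      have := (PySem.List.mem_pyRange_one.mp hx).2
      simp; omega
  · rw [PySem.List.pyRange_one_eq_nil (le_of_lt h), List.filter_eq_nil_iff.mpr]
    intro x hx
    have := (PySem.List.mem_pyRange_one.mp hx).2
    simp; omega

theorem pv_map_shift_range (s N : Int) :
    (PySem.List.pyRange 0 (N - s) 1).map (fun i => i + s) = PySem.List.pyRange s N 1 := by
  rw [PySem.List.pyRange_one, PySem.List.pyRange_one, List.map_map,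
      show N - s - 0 = N - s by ring]
  apply List.map_congr_left
  intro k _
  simp [Function.comp]; omega

theorem pv_map_filter (l : List Int) (P : Int → Bool) (s : Int) :
    (l.filter (fun i => P (i + s))).map (fun i => i + s) = (l.map (fun i => i + s)).filter P := by
  induction l with
  | nil => rfl
  | cons x xs ih =>
    by_cases hx : P (x + s)
    · simp [hx, ih]
    · simp [hx, ih]

theorem pv_flatMap_congr {α β : Type} (l : List α) (f g : α → List β)
    (h : ∀ x ∈ l, f x = g x) : l.flatMap f = l.flatMap g := by
  induction l with
  | nil => rfl
  | cons x xs ih =>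
    simp only [List.flatMap_cons, h x (List.mem_cons_self), ih (fun y hy => h y (List.mem_cons_of_mem _ hy))]

theorem pv_filter_absorb (m : List Int) (s s' : Int) (h : s ≤ s') :
    (m.filter (fun p => decide (s ≤ p))).filter (fun p => decide (s' ≤ p))
      = m.filter (fun p => decide (s' ≤ p)) := by
  rw [List.filter_filter]
  apply List.filter_congr
  intro p _
  simp; omega

theorem pv_emit_eq (L : List Int) : ∀ (m out : List Int), m.Pairwise (· ≤ ·) → L.Pairwise (· ≤ ·) →
    pvEmit L m out = out ++ L.flatMap (fun s => m.filter (fun p => decide (s ≤ p))) := by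
  induction L with
  | nil => intro m out _ _; simp [pvEmit]
  | cons s L' ih =>
    intro m out hm hL
    rcases List.pairwise_cons.mp hL with ⟨hs, hL'⟩
    simp only [pvEmit, List.flatMap_cons]
    rw [pv_skipLt_eq_filter m s hm]
    by_cases hrem : m.filter (fun p => decide (s ≤ p)) = []
    · rw [if_pos hrem, hrem,
          pv_flatMap_congr L' _ (fun _ => ([] : List Int))
            (by
              intro s' hs'
              rw [← pv_filter_absorb m s s' (hs s' hs'), hrem, List.filter_nil])]
      simp
    · rw [if_neg hrem,
          ih _ _ (hm.filter _) hL',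
          pv_flatMap_congr L' _ (fun s' => m.filter (fun p => decide (s' ≤ p)))
            (fun s' hs' => pv_filter_absorb m s s' (hs s' hs')),
          List.append_assoc]

theorem pv_inner_per_shift (bits : List Int) (access_address : String) (s : Int) (hs : 0 ≤ s)
    (acc : List Int) :
    (PySem.List.pyRange 0 (PySem.List.len bits - PySem.Str.len access_address - s) 1).foldl
      (fun found2 i =>
        if PySem.Str.join ""
            ((PySem.List.slice bits (some (i + s)) (some (i + s + PySem.Str.len access_address))).map
              PySem.Int.toStr) == access_address
        then found2 ++ [i + s] else found2) acc
    = acc ++ ((PySem.List.pyRange 0 (PySem.List.len bits - PySem.Str.len access_address) 1).filter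
        (fun p =>
          PySem.Str.join ""
            ((PySem.List.slice bits (some p) (some (p + PySem.Str.len access_address))).map
              PySem.Int.toStr) == access_address)).filter (fun p => decide (s ≤ p)) := by
  set P : Int → Bool := fun p =>
    PySem.Str.join ""
      ((PySem.List.slice bits (some p) (some (p + PySem.Str.len access_address))).map
        PySem.Int.toStr) == access_address with hP
  set N : Int := PySem.List.len bits - PySem.Str.len access_address with hN
  rw [PySem.List.foldl_append_if (fun i => P (i + s)) (fun i => i + s)]
  congr 1
  rw [pv_map_filter, pv_map_shift_range, ← pv_filter_le_pyRange s N hs,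
      List.filter_filter, List.filter_filter]
  apply List.filter_congr
  intro p _
  exact Bool.and_comm _ _

-- ===== VERDICT (by name: the statement is the Claim_ definition above) =====
theorem find_access_address_sliding_spec : Claim_equal_find_access_address_sliding := by
  intro bits access_address max_shift _
  unfold Spec_find_access_address_sliding
  unfold find_access_address_sliding find_access_address_sliding_alt
  rw [PySem.List.foldl_congr_mem' _ _
      (fun (found : List Int) shift =>
        found ++ ((PySem.List.pyRange 0 (PySem.List.len bits - PySem.Str.len access_address) 1).filter
          (fun p =>
            PySem.Str.join ""
              ((PySem.List.slice bits (some p) (some (p + PySem.Str.len access_address))).map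
                PySem.Int.toStr) == access_address)).filter (fun p => decide (shift ≤ p))) _
      (by
        intro s hsmem acc
        have hs : 0 ≤ s := (PySem.List.mem_pyRange_one.mp hsmem).1
        exact pv_inner_per_shift bits access_address s hs acc)]
  rw [PySem.List.foldl_append_eq_flatMap, List.nil_append]
  rw [pv_emit_eq _ _ _
      (((PySem.List.pairwise_lt_pyRange_one 0 _).filter _).imp le_of_lt)
      ((PySem.List.pairwise_lt_pyRange_one 0 _).imp le_of_lt)]
  simp
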